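-- pv_equiv track=rewrite | github.com/J-Man-2024/DSA_Jan_2025_resolution | week_05_Apr_09_to_Apr_16/Revision_02/06_Arrays/problem_09.py | union_of_arrays_better
-- ===== SOURCE A (Python) =====
-- def union_of_arrays_better(arr1, arr2):
-- #     using Hash map (dict)
--     freq = {}
--     result = []
--     for num in arr1:
--         freq[num] = freq.get(num, 0) + 1
--     for num in arr2:
--         freq[num] = freq.get(num, 0) + 1
--     for num in freq:
--         result.append(num)
--     return result
-- ===== SOURCE B (Python) =====
-- def union_of_arrays_better(arr1, arr2):
--     # seen-set + build result during iteration (no frequency counting, no key pass)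
--     seen = set()
--     result = []
--     for num in arr1:
--         if num not in seen:
--             seen.add(num)
--             result.append(num)
--     for num in arr2:
--         if num not in seen:
--             seen.add(num)
--             result.append(num)
--     return result
-- ===== Notes on version B (the rewrite author's own statement) =====
-- stated objective: idiomatic
-- what changed: Replaced the frequency dict plus a separate key-extraction pass with a seen-set first-seen filter that appends to the result directly inside the element loops.
import Mathlib
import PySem

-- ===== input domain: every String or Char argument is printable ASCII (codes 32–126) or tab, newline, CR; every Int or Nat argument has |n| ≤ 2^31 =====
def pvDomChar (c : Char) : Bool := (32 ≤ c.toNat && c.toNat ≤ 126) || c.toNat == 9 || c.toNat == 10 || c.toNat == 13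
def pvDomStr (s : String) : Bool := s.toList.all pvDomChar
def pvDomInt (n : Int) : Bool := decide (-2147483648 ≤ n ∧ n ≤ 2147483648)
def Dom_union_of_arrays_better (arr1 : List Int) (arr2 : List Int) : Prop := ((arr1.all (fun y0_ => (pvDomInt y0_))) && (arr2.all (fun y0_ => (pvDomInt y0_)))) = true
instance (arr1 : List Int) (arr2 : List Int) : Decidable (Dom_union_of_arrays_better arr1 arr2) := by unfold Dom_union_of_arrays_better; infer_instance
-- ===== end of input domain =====

-- B replaces A's frequency dict + key-extraction pass with a seen-set filter appending during iteration (idiomatic; same cost).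

-- ===== PORT A =====
def union_of_arrays_better (arr1 : List Int) (arr2 : List Int) : List Int :=
  let freq : PySem.Dict Int Int := PySem.Dict.empty
  let result : List Int := []
  let freq := arr1.foldl (fun d num => d.insert num (d.getD num 0 + 1)) freq
  let freq := arr2.foldl (fun d num => d.insert num (d.getD num 0 + 1)) freq
  freq.keys.foldl (fun r num => r ++ [num]) result

-- ===== PORT B =====
def union_of_arrays_better_alt (arr1 : List Int) (arr2 : List Int) : List Int :=
  let step := fun (st : PySem.Set Int × List Int) (num : Int) =>
    if st.1.contains num then st else (PySem.Set.add st.1 num, st.2 ++ [num])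
  let st : PySem.Set Int × List Int := (PySem.Set.empty, [])
  let st := arr1.foldl step st
  let st := arr2.foldl step st
  st.2

-- ===== PRECONDITION & SPEC =====
def Spec_union_of_arrays_better (arr1 : List Int) (arr2 : List Int) (out : List Int) : Prop := out = union_of_arrays_better_alt arr1 arr2
instance (arr1 : List Int) (arr2 : List Int) (out : List Int) : Decidable (Spec_union_of_arrays_better arr1 arr2 out) := by unfold Spec_union_of_arrays_better; infer_instance

-- ===== CLAIM (what is proved, stated in full; the proofs are below) =====
def Claim_equal_union_of_arrays_better : Prop := ∀ (arr1 : List Int) (arr2 : List Int), Dom_union_of_arrays_better arr1 arr2 → Spec_union_of_arrays_better arr1 arr2 (union_of_arrays_better arr1 arr2)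

-- ===== LEMMAS AND PROOFS =====

-- B's loop keeps seen = result; one step is exactly Set.add on both components.
theorem alt_foldl_diag (l : List Int) (s : List Int) :
    l.foldl (fun (st : PySem.Set Int × List Int) (num : Int) =>
      if st.1.contains num then st else (PySem.Set.add st.1 num, st.2 ++ [num])) (s, s)
    = (PySem.Set.update s l, PySem.Set.update s l) := by
  induction l generalizing s with
  | nil => rfl
  | cons a t ih =>
    rw [List.foldl_cons]
    have hstep : (if List.contains s a = true then ((s : PySem.Set Int), s)
        else (PySem.Set.add s a, s ++ [a])) = (PySem.Set.add s a, PySem.Set.add s a) := by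
      simp only [PySem.Set.add, PySem.Set.contains]
      split_ifs <;> rfl
    show List.foldl (fun (st : PySem.Set Int × List Int) (num : Int) =>
        if st.1.contains num then st else (PySem.Set.add st.1 num, st.2 ++ [num]))
        (if List.contains s a = true then ((s : PySem.Set Int), s)
          else (PySem.Set.add s a, s ++ [a])) t
      = (PySem.Set.update s (a :: t), PySem.Set.update s (a :: t))
    rw [hstep, ih]
    rfl

theorem foldl_append_id (l : List Int) (r : List Int) :
    l.foldl (fun r num => r ++ [num]) r = r ++ l := by
  induction l generalizing r with
  | nil => simp
  | cons a t ih => simp [List.foldl_cons, ih]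

-- ===== VERDICT (by name: the statement is the Claim_ definition above) =====
theorem union_of_arrays_better_spec : Claim_equal_union_of_arrays_better := by
  intro arr1 arr2 _
  unfold Spec_union_of_arrays_better union_of_arrays_better union_of_arrays_better_alt
  simp only [PySem.Dict.keys_foldl_insert, PySem.Dict.keys_empty, foldl_append_id]
  have h1 := alt_foldl_diag arr1 ([] : List Int)
  rw [show (PySem.Set.empty : PySem.Set Int) = ([] : List Int) from rfl, h1,
      alt_foldl_diag]
  simp
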